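-- pv_equiv track=rewrite | github.com/pfnet-research/jfbench | src/jfbench/visualization/model_order.py | order_labels
-- ===== SOURCE A (Python) =====
-- from typing import Iterable
-- from typing import Sequence
--
-- def order_labels(existing: Iterable[str], preferred: Sequence[str] | None) -> list[str]:
--     values = [str(label) for label in existing]
--     available = set(values)
--     ordered: list[str] = []
--     if preferred:
--         for label in preferred:
--             label_str = str(label)
--             if label_str in available and label_str not in ordered:
--                 ordered.append(label_str)
--     for label in values:
--         if label not in ordered:
--             ordered.append(label)
--     return ordered
-- ===== SOURCE B (Python) =====
-- def order_labels(existing, preferred):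
--     uniq = list(dict.fromkeys(str(label) for label in existing))
--     rank = {}
--     if preferred:
--         for label in preferred:
--             rank.setdefault(str(label), len(rank))
--     base = len(rank)
--     for i, label in enumerate(uniq):
--         rank.setdefault(label, base + i)
--     return sorted(uniq, key=lambda label: rank[label])
-- ===== Notes on version B (the rewrite author's own statement) =====
-- stated objective: faster
-- what changed: Replaces A's two passes with linear 'not in ordered' list scans by a dict-based dedup, a first-occurrence rank table (preferred ranks first, then existing positions), and one stable sort of the unique labels by rank.
import Mathlib
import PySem

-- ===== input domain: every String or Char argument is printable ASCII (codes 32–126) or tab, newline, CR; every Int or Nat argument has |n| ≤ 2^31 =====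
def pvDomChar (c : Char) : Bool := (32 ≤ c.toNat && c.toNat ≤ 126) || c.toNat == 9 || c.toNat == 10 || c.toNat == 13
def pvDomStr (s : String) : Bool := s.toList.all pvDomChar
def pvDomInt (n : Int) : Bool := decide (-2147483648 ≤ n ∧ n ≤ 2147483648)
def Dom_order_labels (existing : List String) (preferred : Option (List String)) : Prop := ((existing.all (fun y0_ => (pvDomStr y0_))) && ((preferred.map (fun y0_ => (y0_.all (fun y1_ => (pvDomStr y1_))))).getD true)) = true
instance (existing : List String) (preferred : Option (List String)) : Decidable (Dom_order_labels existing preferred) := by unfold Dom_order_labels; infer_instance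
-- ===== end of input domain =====

-- B replaces A's two membership-scan passes by a dict-based dedup, a first-occurrence rank
-- table and one stable sort of the unique labels by rank (objective: faster).

-- ===== PORT A =====
def order_labels (existing : List String) (preferred : Option (List String)) : List String :=
  -- values = [str(label) for label in existing]; str() on a str returns it unchanged
  let values := existing.map (fun label => label)
  let available : PySem.Set String := PySem.Set.ofList values
  -- `if preferred:` — None and the empty list are both falsy
  let ordered : List String :=
    match preferred with
    | none => []
    | some pref =>
      if pref.isEmpty then []
      else pref.foldl (fun ordered label =>
        let label_str := label
        if PySem.Set.contains available label_str && !ordered.contains label_str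
        then ordered ++ [label_str] else ordered) []
  values.foldl (fun ordered label =>
    if !ordered.contains label then ordered ++ [label] else ordered) ordered

-- ===== PORT B =====
def order_labels_alt (existing : List String) (preferred : Option (List String)) : List String :=
  -- uniq = list(dict.fromkeys(str(label) for label in existing)); str() on a str is the identity
  let uniq := PySem.List.dedup (existing.map (fun label => label))
  -- rank = {}; if preferred: for label in preferred: rank.setdefault(str(label), len(rank))
  let rank0 : PySem.Dict String Int :=
    match preferred with
    | none => PySem.Dict.empty
    | some pref =>
      if pref.isEmpty then PySem.Dict.empty
      else pref.foldl (fun rank label => rank.setdefault label (rank.size : Int)) PySem.Dict.empty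
  let base : Int := (rank0.size : Int)
  -- for i, label in enumerate(uniq): rank.setdefault(label, base + i)
  let rank := (PySem.List.enumerate uniq).foldl
    (fun rank p => rank.setdefault p.2 (base + p.1)) rank0
  -- rank[label]: every label of uniq has been given a rank, so getD's default is never consulted
  PySem.List.sorted uniq (fun label => rank.getD label 0)

-- ===== PRECONDITION & SPEC =====
def Spec_order_labels (existing : List String) (preferred : Option (List String)) (out : List String) : Prop := out = order_labels_alt existing preferred
instance (existing : List String) (preferred : Option (List String)) (out : List String) : Decidable (Spec_order_labels existing preferred out) := by unfold Spec_order_labels; infer_instance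

-- ===== CLAIM (what is proved, stated in full; the proofs are below) =====
def Claim_equal_order_labels : Prop := ∀ (existing : List String) (preferred : Option (List String)), Dom_order_labels existing preferred → Spec_order_labels existing preferred (order_labels existing preferred)

-- ===== LEMMAS AND PROOFS =====

-- A's first pass: the labels of `pf` that occur in `e`, first occurrences only, in `pf` order.
theorem phase1_eq (e pf : List String) :
    pf.foldl (fun ordered label =>
        if PySem.Set.contains (PySem.Set.ofList e) label && !ordered.contains label
        then ordered ++ [label] else ordered) []
      = PySem.Set.ofList (pf.filter (fun l => PySem.Set.contains (PySem.Set.ofList e) l)) := by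
  have hstep : (fun (ordered : List String) label =>
      if PySem.Set.contains (PySem.Set.ofList e) label && !ordered.contains label
      then ordered ++ [label] else ordered)
      = (fun ordered label => if PySem.Set.contains (PySem.Set.ofList e) label
          then PySem.Set.add ordered label else ordered) := by
    funext ordered label
    rw [PySem.Set.add_eq_ite]
    by_cases h1 : label ∈ e <;> by_cases h2 : label ∈ ordered <;>
      simp [h1, h2, PySem.Set.mem_ofList]
  rw [hstep, PySem.List.foldl_if_eq_foldl_filter, ← PySem.Set.ofList_eq_foldl]

-- A's second pass from accumulator `s`: append each not-yet-seen value.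
theorem phase2_eq (e : List String) (s : PySem.Set String) :
    e.foldl (fun ordered label =>
        if !ordered.contains label then ordered ++ [label] else ordered) s
      = s ++ (PySem.Set.ofList e).filter (fun x => !s.contains x) := by
  have hstep : (fun (ordered : List String) label =>
      if !ordered.contains label then ordered ++ [label] else ordered)
      = PySem.Set.add := by
    funext ordered label
    rw [PySem.Set.add_eq_ite]
    by_cases h2 : label ∈ ordered <;> simp [h2]
  rw [hstep]
  induction e using List.reverseRecOn with
  | nil => simp
  | append_singleton xs x ih =>
    rw [List.foldl_append, List.foldl_cons, List.foldl_nil, ih, PySem.Set.ofList_append_singleton,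
        PySem.Set.add_eq_ite, PySem.Set.add_eq_ite]
    by_cases hx : x ∈ PySem.Set.ofList xs
    · simp [hx]
    · by_cases hs : x ∈ s
      · simp [hx, hs]
      · simp [hx, hs]

-- ordered dedup commutes with filter
theorem ofList_filter (pf : List String) (p : String → Bool) :
    PySem.Set.ofList (pf.filter p) = (PySem.Set.ofList pf).filter p := by
  induction pf using List.reverseRecOn with
  | nil => simp
  | append_singleton xs x ih =>
    rw [List.filter_append, PySem.Set.ofList_append_singleton]
    by_cases hpx : p x
    · have h1 : List.filter p [x] = [x] := by simp [hpx]
      rw [h1, PySem.Set.ofList_append_singleton, PySem.Set.add_eq_ite, PySem.Set.add_eq_ite]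
      by_cases hx : x ∈ PySem.Set.ofList xs
      · simp [hx, ih, hpx]
      · simp [hx, ih, List.filter_append, hpx]
    · have h1 : List.filter p [x] = [] := by simp [hpx]
      rw [h1, List.append_nil, PySem.Set.add_eq_ite]
      by_cases hx : x ∈ PySem.Set.ofList xs
      · simp [hx, ih]
      · simp [hx, ih, List.filter_append, hpx]

-- the rank table built from `pf`: items are (label, first-occurrence index over dedup pf)
theorem rank0_items (pf : List String) :
    (pf.foldl (fun d l => d.setdefault l (d.size : Int)) PySem.Dict.empty).items
      = (PySem.List.enumerate (PySem.Set.ofList pf)).map (fun q => (q.2, q.1)) := by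
  induction pf using List.reverseRecOn with
  | nil => simp [PySem.Dict.empty]
  | append_singleton xs x ih =>
    rw [List.foldl_append, List.foldl_cons, List.foldl_nil, PySem.Set.ofList_append_singleton]
    set d := xs.foldl (fun d l => d.setdefault l (d.size : Int)) PySem.Dict.empty with hd
    have hkeys : d.keys = PySem.Set.ofList xs := by
      have h1 : d.keys = d.items.map Prod.fst := rfl
      rw [h1, ih, List.map_map]
      have h2 : (Prod.fst ∘ fun q : ℤ × String => (q.2, q.1)) = Prod.snd := rfl
      rw [h2, PySem.List.map_snd_enumerate]
    have hsize : (d.size : Int) = ((PySem.Set.ofList xs).length : Int) := by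
      have h1 : d.size = d.items.length := rfl
      rw [h1, ih, List.length_map, PySem.List.length_enumerate]
    by_cases hx : x ∈ PySem.Set.ofList xs
    · have hc : d.contains x = true := by
        rw [PySem.Dict.contains_iff_mem_keys, hkeys]; exact hx
      rw [PySem.Dict.setdefault_of_contains _ _ hc, PySem.Set.add_of_mem hx, ih]
    · have hc : d.contains x = false := by
        rw [← Bool.not_eq_true, PySem.Dict.contains_iff_mem_keys, hkeys]; exact hx
      rw [PySem.Dict.setdefault_of_not_contains _ _ hc,
          PySem.Dict.items_insert_of_not_contains _ _ hc, ih, PySem.Set.add_of_not_mem hx,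
          PySem.List.enumerate_append, List.map_append]
      simp [PySem.List.enumerate, hsize]

theorem rank0_keys (pf : List String) :
    (pf.foldl (fun d l => d.setdefault l (d.size : Int)) PySem.Dict.empty).keys
      = PySem.Set.ofList pf := by
  have h : (pf.foldl (fun d l => d.setdefault l (d.size : Int)) PySem.Dict.empty).keys
      = (pf.foldl (fun d l => d.setdefault l (d.size : Int)) PySem.Dict.empty).items.map Prod.fst := rfl
  rw [h, rank0_items, List.map_map]
  have h2 : (Prod.fst ∘ fun q : ℤ × String => (q.2, q.1)) = Prod.snd := rfl
  rw [h2, PySem.List.map_snd_enumerate]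

theorem rank0_getD (pf : List String) (x : String) (hx : x ∈ PySem.Set.ofList pf) :
    (pf.foldl (fun d l => d.setdefault l (d.size : Int)) PySem.Dict.empty).getD x 0
      = (List.idxOf x (PySem.Set.ofList pf) : Int) := by
  set L := PySem.Set.ofList pf with hL
  have hlt : List.idxOf x L < L.length := List.idxOf_lt_length_of_mem hx
  have hget : L[List.idxOf x L] = x := List.getElem_idxOf hlt
  have hmem : ((List.idxOf x L : Int), x) ∈ PySem.List.enumerate L := by
    rw [PySem.List.mem_enumerate_iff]
    exact ⟨List.idxOf x L, hlt, by simp [hget]⟩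
  have hitems : (x, (List.idxOf x L : Int)) ∈
      (pf.foldl (fun d l => d.setdefault l (d.size : Int)) PySem.Dict.empty).items := by
    rw [rank0_items]
    exact List.mem_map.mpr ⟨_, hmem, rfl⟩
  have hnd : (pf.foldl (fun d l => d.setdefault l (d.size : Int)) PySem.Dict.empty).keys.Nodup := by
    rw [rank0_keys]; exact PySem.Set.nodup_ofList pf
  exact PySem.Dict.getD_of_mem_items _ hitems hnd 0

theorem getD_setdefault_of_ne (d : PySem.Dict String Int) (k k' : String) (v d0 : Int)
    (h : k' ≠ k) : (d.setdefault k v).getD k' d0 = d.getD k' d0 := by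
  have h1 : (d.setdefault k v).getD k' d0 = ((d.setdefault k v).get? k').getD d0 := rfl
  have h2 : d.getD k' d0 = (d.get? k').getD d0 := rfl
  rw [h1, h2, PySem.Dict.get?_setdefault_of_ne _ _ h]

-- a setdefault-fold never changes the value of a key the dict already has
theorem fold_setdefault_pres (l : List (Int × String)) (f : Int × String → Int)
    (d : PySem.Dict String Int) (k : String) (hk : d.contains k = true) :
    (l.foldl (fun d p => d.setdefault p.2 (f p)) d).getD k 0 = d.getD k 0 := by
  induction l generalizing d with
  | nil => rfl
  | cons p t ih =>
    rw [List.foldl_cons]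
    by_cases hpk : p.2 = k
    · subst hpk
      rw [PySem.Dict.setdefault_of_contains _ _ hk]
      exact ih d hk
    · have hk' : (d.setdefault p.2 (f p)).contains k = true := by
        rw [PySem.Dict.contains_setdefault]
        simp [hk]
      rw [ih _ hk', getD_setdefault_of_ne _ _ _ _ _ (fun h => hpk h.symm)]

-- a setdefault-fold over the enumeration of a duplicate-free list gives a fresh key its index
theorem fold_setdefault_fresh (b : Int) :
    ∀ (l : List String) (s : Int) (d : PySem.Dict String Int) (k : String),
    l.Nodup → k ∈ l → d.contains k = false →
    ((PySem.List.enumerate l s).foldl (fun d p => d.setdefault p.2 (b + p.1)) d).getD k 0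
      = b + s + (List.idxOf k l : Int) := by
  intro l
  induction l with
  | nil => intro s d k _ hk; simp at hk
  | cons x t ih =>
    intro s d k hnd hk hc
    rw [PySem.List.enumerate_cons, List.foldl_cons]
    by_cases hkx : k = x
    · subst hkx
      rw [PySem.Dict.setdefault_of_not_contains _ _ hc]
      have hcontains : (d.insert k (b + s)).contains k = true := PySem.Dict.contains_insert_self d k _
      rw [fold_setdefault_pres _ _ _ _ hcontains, PySem.Dict.getD_insert_self]
      simp
    · have hkt : k ∈ t := by
        rcases List.mem_cons.mp hk with h | h
        · exact absurd h hkx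
        · exact h
      have hc' : (d.setdefault x (b + s)).contains k = false := by
        rw [PySem.Dict.contains_setdefault]
        simp [hc, hkx]
      rw [ih (s + 1) _ k (List.Nodup.of_cons hnd) hkt hc']
      rw [List.idxOf_cons_ne _ (fun h => hkx (by simpa using h.symm))]
      push_cast
      ring

-- along a duplicate-free list, indices of later elements are larger
theorem pairwise_idxOf (L : List String) (h : L.Nodup) :
    L.Pairwise (fun a b => List.idxOf a L < List.idxOf b L) := by
  rw [List.pairwise_iff_getElem]
  intro i j hi hj hij
  rw [List.Nodup.idxOf_getElem h i hi, List.Nodup.idxOf_getElem h j hj]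
  exact hij

-- the master equality, for the effective (possibly empty) preferred list `pl`
theorem master (e pl : List String) :
    e.foldl (fun ordered label =>
        if !ordered.contains label then ordered ++ [label] else ordered)
      (pl.foldl (fun ordered label =>
          if PySem.Set.contains (PySem.Set.ofList e) label && !ordered.contains label
          then ordered ++ [label] else ordered) [])
    = PySem.List.sorted (PySem.Set.ofList e)
        (fun label => ((PySem.List.enumerate (PySem.Set.ofList e)).foldl
            (fun d p => d.setdefault p.2
              (((pl.foldl (fun d l => d.setdefault l (d.size : Int)) PySem.Dict.empty).size : Int) + p.1))
            (pl.foldl (fun d l => d.setdefault l (d.size : Int)) PySem.Dict.empty)).getD label 0) := by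
  rw [phase1_eq, phase2_eq]
  set E := PySem.Set.ofList e with hE
  set rank0 := pl.foldl (fun d l => d.setdefault l (d.size : Int)) PySem.Dict.empty with hrank0
  set base : Int := (rank0.size : Int) with hbase
  set P := PySem.Set.ofList (pl.filter (fun l => PySem.Set.contains E l)) with hP
  set Q := E.filter (fun x => !P.contains x) with hQ
  set key := fun label => ((PySem.List.enumerate E).foldl
      (fun d p => d.setdefault p.2 (base + p.1)) rank0).getD label 0 with hkey
  have hEnd : E.Nodup := PySem.Set.nodup_ofList e
  have hPnd : P.Nodup := PySem.Set.nodup_ofList _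
  have memE : ∀ x, x ∈ E ↔ x ∈ e := fun x => PySem.Set.mem_ofList e x
  have memP : ∀ x, x ∈ P ↔ x ∈ pl ∧ x ∈ e := by
    intro x
    rw [hP, PySem.Set.mem_ofList, List.mem_filter]
    constructor
    · rintro ⟨h1, h2⟩
      exact ⟨h1, (memE x).mp ((PySem.Set.contains_iff E x).mp h2)⟩
    · rintro ⟨h1, h2⟩
      exact ⟨h1, (PySem.Set.contains_iff E x).mpr ((memE x).mpr h2)⟩
  have memQ : ∀ x, x ∈ Q ↔ x ∈ E ∧ x ∉ P := by
    intro x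
    rw [hQ, List.mem_filter]
    simp
  have hbase' : base = ((PySem.Set.ofList pl).length : Int) := by
    have h1 : rank0.size = rank0.items.length := rfl
    rw [hbase, h1, hrank0, rank0_items, List.length_map, PySem.List.length_enumerate]
  have keyP : ∀ x ∈ P, key x = (List.idxOf x (PySem.Set.ofList pl) : Int) := by
    intro x hx
    have hxpl : x ∈ PySem.Set.ofList pl := (PySem.Set.mem_ofList pl x).mpr ((memP x).mp hx).1
    have hc : rank0.contains x = true := by
      rw [PySem.Dict.contains_iff_mem_keys, hrank0, rank0_keys]; exact hxpl
    rw [hkey]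
    have h1 := fold_setdefault_pres (PySem.List.enumerate E) (fun p => base + p.1) rank0 x hc
    simp only at h1 ⊢
    rw [h1, hrank0, rank0_getD pl x hxpl]
  have keyQ : ∀ x ∈ Q, key x = base + (List.idxOf x E : Int) := by
    intro x hx
    obtain ⟨hxE, hxP⟩ := (memQ x).mp hx
    have hxpl : x ∉ pl := fun h => hxP ((memP x).mpr ⟨h, (memE x).mp hxE⟩)
    have hc : rank0.contains x = false := by
      rw [← Bool.not_eq_true, PySem.Dict.contains_iff_mem_keys, hrank0, rank0_keys,
          PySem.Set.mem_ofList]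
      exact hxpl
    rw [hkey]
    have h1 := fold_setdefault_fresh base E 0 rank0 x hEnd hxE hc
    simp only at h1 ⊢
    rw [h1]
    ring
  have hQnd : Q.Nodup := List.Nodup.filter _ hEnd
  have hPQnd : (P ++ Q).Nodup := by
    rw [List.nodup_append]
    refine ⟨hPnd, hQnd, ?_⟩
    intro a ha b hb hab
    subst hab
    exact ((memQ a).mp hb).2 ha
  have hperm : (P ++ Q).Perm E := by
    rw [List.perm_ext_iff_of_nodup hPQnd hEnd]
    intro x
    rw [List.mem_append, memQ x]
    constructor
    · rintro (h | ⟨h, _⟩)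
      · exact (memE x).mpr ((memP x).mp h).2
      · exact h
    · intro h
      by_cases hx : x ∈ P
      · exact Or.inl hx
      · exact Or.inr ⟨h, hx⟩
  have hpw : List.Pairwise (fun a b => key a < key b) (P ++ Q) := by
    rw [List.pairwise_append]
    refine ⟨?_, ?_, ?_⟩
    · have hsub : P.Sublist ((PySem.Set.ofList pl).filter (fun l => PySem.Set.contains E l)) := by
        rw [hP, ofList_filter]
      have hpl := pairwise_idxOf (PySem.Set.ofList pl) (PySem.Set.nodup_ofList pl)
      have h1 := List.Pairwise.sublist (hsub.trans List.filter_sublist) hpl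
      exact h1.imp_of_mem (fun ha hb h => by
        rw [keyP _ ha, keyP _ hb]; exact_mod_cast h)
    · have hpl := pairwise_idxOf E hEnd
      have hsubQ : Q.Sublist E := by rw [hQ]; exact List.filter_sublist
      have h1 := List.Pairwise.sublist hsubQ hpl
      exact h1.imp_of_mem (fun {a b} ha hb h => by
        rw [keyQ _ ha, keyQ _ hb]
        have h' : (List.idxOf a E : Int) < (List.idxOf b E : Int) := by exact_mod_cast h
        omega)
    · intro a ha b hb
      rw [keyP _ ha, keyQ _ hb]
      have h1 : List.idxOf a (PySem.Set.ofList pl) < (PySem.Set.ofList pl).length :=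
        List.idxOf_lt_length_of_mem ((PySem.Set.mem_ofList pl a).mpr ((memP a).mp ha).1)
      have h2 : (0:Int) ≤ (List.idxOf b E : Int) := Int.natCast_nonneg _
      rw [hbase']
      have h1' : (List.idxOf a (PySem.Set.ofList pl) : Int) < ((PySem.Set.ofList pl).length : Int) := by
        exact_mod_cast h1
      omega
  exact (PySem.List.sorted_eq_of_perm_of_pairwise_lt E (P ++ Q) key hperm hpw).symm

-- ===== VERDICT (by name: the statement is the Claim_ definition above) =====
theorem order_labels_spec : Claim_equal_order_labels := by
  intro existing preferred _
  unfold Spec_order_labels order_labels order_labels_alt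
  simp only [List.map_id', PySem.List.dedup_eq_ofList]
  cases preferred with
  | none => exact master existing []
  | some p =>
    by_cases hp : p.isEmpty
    · rw [List.isEmpty_iff] at hp
      subst hp
      simp only [List.isEmpty_nil, if_true]
      exact master existing []
    · simp only [hp]
      exact master existing p
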